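-- pv_equiv track=rewrite | github.com/ronaldvandenbroek/BPAD | analysis/utils/process_raw_data.py | largest_false_streak
-- ===== SOURCE A (Python) =====
-- def largest_false_streak(boolean_array):
--     max_streak = 0
--     current_streak = 0
--
--     for value in boolean_array:
--         if not value:
--             current_streak += 1
--             max_streak = max(max_streak, current_streak)
--         else:
--             current_streak = 0
--
--     return max_streak
-- ===== SOURCE B (Python) =====
-- def largest_false_streak(boolean_array):
--     # Longest falsy run = largest gap between consecutive truthy positions,
--     # with sentinels -1 before the start and len(boolean_array) after the end.
--     bounds = [-1] + [i for i, v in enumerate(boolean_array) if v] + [len(boolean_array)]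
--     return max(b - a - 1 for a, b in zip(bounds, bounds[1:]))
-- ===== Notes on version B (the rewrite author's own statement) =====
-- stated objective: alternative
-- what changed: B finds the longest falsy run as the largest gap between consecutive truthy positions: it builds the index list of truthy values (with sentinels -1 and len) and takes the max of adjacent differences minus one, instead of A's inline current/max streak counters over the values.
import Mathlib
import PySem

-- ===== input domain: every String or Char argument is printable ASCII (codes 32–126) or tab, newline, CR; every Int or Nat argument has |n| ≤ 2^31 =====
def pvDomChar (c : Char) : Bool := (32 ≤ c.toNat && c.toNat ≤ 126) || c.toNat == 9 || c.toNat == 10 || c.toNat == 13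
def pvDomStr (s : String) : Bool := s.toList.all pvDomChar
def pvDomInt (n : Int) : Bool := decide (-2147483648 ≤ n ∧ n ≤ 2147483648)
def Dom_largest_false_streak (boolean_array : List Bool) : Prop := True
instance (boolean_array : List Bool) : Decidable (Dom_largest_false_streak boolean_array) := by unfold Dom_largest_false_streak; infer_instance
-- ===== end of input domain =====

-- B computes the longest falsy run as the largest gap between consecutive truthy
-- positions (with sentinels -1 and len), instead of A's inline current/max streak
-- counters over the values (objective: alternative algorithm, index/gap based).


-- ===== PORT A =====
-- literal port of A: one fold over the state (max_streak, current_streak)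
def stepA (acc : Int × Int) (value : Bool) : Int × Int :=
  if value = false then (max acc.1 (acc.2 + 1), acc.2 + 1) else (acc.1, 0)

def largest_false_streak (boolean_array : List Bool) : Int :=
  (boolean_array.foldl stepA ((0 : Int), (0 : Int))).1

-- ===== PORT B =====
-- literal port of Source B: bounds = [-1] + truthy positions (enumerate + filter) + [len];
-- bounds[1:] is bounds.tail; Python's max over the gap generator (always nonempty,
-- bounds has ≥ 2 elements) is PySem.List.max?; its .getD 0 branch is unreachable.
def largest_false_streak_alt (boolean_array : List Bool) : Int :=
  let bounds : List Int :=
    [-1] ++ ((PySem.List.enumerate boolean_array).filter (fun p => p.2)).map (fun p => p.1)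
         ++ [(boolean_array.length : Int)]
  (PySem.List.max? ((bounds.zip bounds.tail).map (fun p => p.2 - p.1 - 1)) (fun y => y)).getD 0

-- ===== PRECONDITION & SPEC =====
def Spec_largest_false_streak (boolean_array : List Bool) (out : Int) : Prop := out = largest_false_streak_alt boolean_array
instance (boolean_array : List Bool) (out : Int) : Decidable (Spec_largest_false_streak boolean_array out) := by unfold Spec_largest_false_streak; infer_instance

-- ===== CLAIM =====
def Claim_equal_largest_false_streak : Prop := ∀ (boolean_array : List Bool), Dom_largest_false_streak boolean_array → Spec_largest_false_streak boolean_array (largest_false_streak boolean_array)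

-- ===== LEMMAS AND PROOFS =====

-- reference value: best falsy streak, given a pending falsy run of length cs
def bestRun : Int → List Bool → Int
  | cs, [] => cs
  | cs, v :: t => if v then max cs (bestRun 0 t) else bestRun (cs + 1) t

theorem le_bestRun : ∀ (xs : List Bool) (cs : Int), cs ≤ bestRun cs xs := by
  intro xs
  induction xs with
  | nil => intro cs; simp [bestRun]
  | cons v t ih =>
    intro cs
    cases v
    · have e : bestRun cs (false :: t) = bestRun (cs + 1) t := rfl
      have := ih (cs + 1)
      omega
    · have e : bestRun cs (true :: t) = max cs (bestRun 0 t) := rfl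
      omega

theorem foldA_eq : ∀ (xs : List Bool) (ms cs : Int), 0 ≤ cs → cs ≤ ms →
    (xs.foldl stepA (ms, cs)).1 = max ms (bestRun cs xs) := by
  intro xs
  induction xs with
  | nil => intro ms cs h0 h; simp [bestRun]; omega
  | cons v t ih =>
    intro ms cs h0 h
    cases v
    · have e1 : (false :: t).foldl stepA (ms, cs) = t.foldl stepA (max ms (cs + 1), cs + 1) := rfl
      have e2 : bestRun cs (false :: t) = bestRun (cs + 1) t := rfl
      rw [e1, e2, ih _ _ (by omega) (by omega)]
      have := le_bestRun t (cs + 1)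
      omega
    · have e1 : (true :: t).foldl stepA (ms, cs) = t.foldl stepA (ms, 0) := rfl
      have e2 : bestRun cs (true :: t) = max cs (bestRun 0 t) := rfl
      rw [e1, e2, ih _ _ le_rfl (by omega)]
      omega

-- positions of truthy values, counting from offset o
def tp : Int → List Bool → List Int
  | _, [] => []
  | o, v :: t => if v then o :: tp (o + 1) t else tp (o + 1) t

theorem enum_filter_eq_tp : ∀ (xs : List Bool) (s : Int),
    ((PySem.List.enumerate xs s).filter (fun p => p.2)).map (fun p => p.1) = tp s xs := by
  intro xs
  induction xs with
  | nil => intro s; simp [PySem.List.enumerate_nil, tp]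
  | cons v t ih =>
    intro s
    rw [PySem.List.enumerate_cons]
    cases v
    · simpa [List.filter, tp] using ih (s + 1)
    · simpa [List.filter, tp] using ih (s + 1)

-- the gap list of a boundary list, as B computes it
def gapsOf (l : List Int) : List Int :=
  (l.zip l.tail).map (fun p => p.2 - p.1 - 1)

-- completed falsy-run lengths and the trailing pending run
def runsF : Int → List Bool → List Int
  | _, [] => []
  | cs, v :: t => if v then cs :: runsF 0 t else runsF (cs + 1) t

def runTail : Int → List Bool → Int
  | cs, [] => cs
  | cs, v :: t => if v then runTail 0 t else runTail (cs + 1) t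

theorem gaps_eq : ∀ (xs : List Bool) (o prev : Int),
    gapsOf (prev :: (tp o xs ++ [o + xs.length])) =
      runsF (o - prev - 1) xs ++ [runTail (o - prev - 1) xs] := by
  intro xs
  induction xs with
  | nil => intro o prev; simp [tp, gapsOf, runsF, runTail]
  | cons v t ih =>
    intro o prev
    cases v
    · have e1 : tp o (false :: t) = tp (o + 1) t := rfl
      have e2 : ((false :: t).length : Int) = (t.length : Int) + 1 := by
        simp [List.length_cons]
      have e3 : runsF (o - prev - 1) (false :: t) = runsF (o - prev - 1 + 1) t := rfl
      have e4 : runTail (o - prev - 1) (false :: t) = runTail (o - prev - 1 + 1) t := rfl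
      rw [e1, e2, e3, e4]
      have := ih (o + 1) prev
      have ho : o + 1 - prev - 1 = o - prev - 1 + 1 := by ring
      rw [ho] at this
      rw [show o + ((t.length : Int) + 1) = o + 1 + (t.length : Int) by ring]
      exact this
    · have e1 : tp o (true :: t) = o :: tp (o + 1) t := rfl
      have e2 : ((true :: t).length : Int) = (t.length : Int) + 1 := by
        simp [List.length_cons]
      have e3 : runsF (o - prev - 1) (true :: t) = (o - prev - 1) :: runsF 0 t := rfl
      have e4 : runTail (o - prev - 1) (true :: t) = runTail 0 t := rfl
      rw [e1, e2, e3, e4]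
      have hcons : gapsOf (prev :: (o :: tp (o + 1) t ++ [o + ((t.length : Int) + 1)])) =
          (o - prev - 1) :: gapsOf (o :: (tp (o + 1) t ++ [o + ((t.length : Int) + 1)])) := rfl
      rw [hcons]
      have := ih (o + 1) o
      have ho : o + 1 - o - 1 = (0 : Int) := by ring
      rw [ho] at this
      rw [show o + ((t.length : Int) + 1) = o + 1 + (t.length : Int) by ring]
      rw [this]
      simp

theorem foldl_max_max : ∀ (l : List Int) (a b : Int),
    l.foldl max (max a b) = max a (l.foldl max b) := by
  intro l
  induction l with
  | nil => intro a b; simp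
  | cons x t ih =>
    intro a b
    simp only [List.foldl_cons]
    rw [max_assoc, ih]

theorem maxOf_runs : ∀ (xs : List Bool) (cs : Int),
    (PySem.List.max? (runsF cs xs ++ [runTail cs xs]) (fun y => y)).getD 0 = bestRun cs xs := by
  intro xs
  induction xs with
  | nil => intro cs; simp [runsF, runTail, bestRun, PySem.List.max?_id_cons]
  | cons v t ih =>
    intro cs
    cases v
    · have e2 : runsF cs (false :: t) = runsF (cs + 1) t := rfl
      have e3 : runTail cs (false :: t) = runTail (cs + 1) t := rfl
      have e4 : bestRun cs (false :: t) = bestRun (cs + 1) t := rfl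
      rw [e2, e3, e4, ih]
    · have e2 : runsF cs (true :: t) = cs :: runsF 0 t := rfl
      have e3 : runTail cs (true :: t) = runTail 0 t := rfl
      have e4 : bestRun cs (true :: t) = max cs (bestRun 0 t) := rfl
      rw [e2, e3, e4]
      rcases hl : runsF 0 t ++ [runTail 0 t] with _ | ⟨h, l⟩
      · simp at hl
      · have h1 := PySem.List.max?_id_cons (x := cs) (t := h :: l)
        have h2 := PySem.List.max?_id_cons (x := h) (t := l)
        have hih := ih 0
        rw [hl, h2] at hih
        simp only [Option.getD_some] at hih
        have : (cs :: runsF 0 t) ++ [runTail 0 t] = cs :: h :: l := by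
          rw [List.cons_append, hl]
        rw [this, h1]
        simp only [Option.getD_some, List.foldl_cons]
        rw [foldl_max_max, hih]

-- ===== VERDICT =====
theorem largest_false_streak_spec : Claim_equal_largest_false_streak := by
  intro xs _
  unfold Spec_largest_false_streak largest_false_streak largest_false_streak_alt
  rw [foldA_eq xs 0 0 le_rfl le_rfl]
  simp only [enum_filter_eq_tp]
  have hb : ([-1] ++ tp 0 xs ++ [(xs.length : Int)]) =
      (-1) :: (tp 0 xs ++ [(0 : Int) + (xs.length : Int)]) := by simp
  rw [hb]
  have hg := gaps_eq xs 0 (-1)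
  have h0 : (0 : Int) - (-1) - 1 = 0 := by ring
  rw [h0] at hg
  symm
  have htail : ((-1) :: (tp 0 xs ++ [(0 : Int) + (xs.length : Int)])).tail
      = tp 0 xs ++ [(0 : Int) + (xs.length : Int)] := rfl
  show (PySem.List.max? ((((-1) :: (tp 0 xs ++ [(0 : Int) + (xs.length : Int)])).zip
      (((-1) :: (tp 0 xs ++ [(0 : Int) + (xs.length : Int)])).tail)).map
      (fun p => p.2 - p.1 - 1)) (fun y => y)).getD 0 = max 0 (bestRun 0 xs)
  rw [htail]
  have : (((-1) :: (tp 0 xs ++ [(0 : Int) + (xs.length : Int)])).zip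
      (tp 0 xs ++ [(0 : Int) + (xs.length : Int)])).map (fun p => p.2 - p.1 - 1)
      = gapsOf ((-1) :: (tp 0 xs ++ [(0 : Int) + (xs.length : Int)])) := rfl
  rw [this, hg, maxOf_runs]
  have := le_bestRun xs 0
  omega
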